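-- pv_equiv track=rewrite | github.com/ronhadad22/DevopsINT2025 | python_katas/kata_1/questions.py | seven_boom
-- ===== SOURCE A (Python) =====
-- def seven_boom(n):
--     result = []
--
--     for i in range(1, n + 1):
--         if i % 7 == 0 or '7' in str(i):
--             result.append(i)
--
--     return result
--
--
--
--
--
--     """
--     1 Kata
-- This functions returns a list of all "Booms" for a 7-boom play starting from 1 to n
--
--     e.g. For n = 30
--     The return value will be [7, 14, 17, 21, 27, 28]
--
--     :param n: int. The last number for count for a 7-boom play
--     :return: list of integers
-- """
--     return None
-- ===== SOURCE B (Python) =====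
-- def seven_boom(n):
--     multiples = range(7, n + 1, 7)
--     with_digit_7 = (i for i in range(1, n + 1) if '7' in str(i))
--     return sorted(set(multiples) | set(with_digit_7))
-- ===== Notes on version B (the rewrite author's own statement) =====
-- stated objective: alternative
-- what changed: Instead of one scan of 1..n with a combined divisible-or-digit predicate appending to a list, B builds the multiples of 7 directly with a stepped range(7, n+1, 7) and the digit-7 numbers separately, then unions the two collections as a set and returns sorted(...) to restore ascending order without duplicates.
import Mathlib
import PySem

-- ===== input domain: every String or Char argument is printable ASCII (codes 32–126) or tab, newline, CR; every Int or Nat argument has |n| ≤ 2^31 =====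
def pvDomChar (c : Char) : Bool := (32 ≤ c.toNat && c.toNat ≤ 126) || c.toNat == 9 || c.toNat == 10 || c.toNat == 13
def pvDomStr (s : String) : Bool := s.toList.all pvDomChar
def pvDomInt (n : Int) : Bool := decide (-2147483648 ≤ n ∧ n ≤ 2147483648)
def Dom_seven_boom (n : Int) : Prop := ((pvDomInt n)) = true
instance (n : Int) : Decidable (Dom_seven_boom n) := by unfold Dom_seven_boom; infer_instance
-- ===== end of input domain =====

-- B builds the multiples of 7 with a stepped range and the digit-7 numbers separately,
-- then merges them with a set union and sorts (objective: alternative decomposition, same cost).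

-- ===== PORT A =====
-- single scan of 1..n with the combined predicate, appending to an accumulator
def seven_boom (n : Int) : List Int :=
  (PySem.List.pyRange 1 (n + 1) 1).foldl
    (fun result i =>
      if PySem.Int.mod i 7 == 0 || PySem.Str.isIn "7" (PySem.Int.toStr i) then result ++ [i]
      else result) []

-- ===== PORT B =====
def seven_boom_alt (n : Int) : List Int :=
  let multiples := PySem.List.pyRange 7 (n + 1) 7
  let with_digit_7 :=
    (PySem.List.pyRange 1 (n + 1) 1).filter (fun i => PySem.Str.isIn "7" (PySem.Int.toStr i))
  PySem.List.sorted (PySem.Set.union (PySem.Set.ofList multiples) (PySem.Set.ofList with_digit_7))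
    (fun x => x) false

-- ===== PRECONDITION & SPEC =====
def Spec_seven_boom (n : Int) (out : List Int) : Prop := out = seven_boom_alt n
instance (n : Int) (out : List Int) : Decidable (Spec_seven_boom n out) := by unfold Spec_seven_boom; infer_instance

-- ===== CLAIM (what is proved, stated in full; the proofs are below) =====
def Claim_equal_seven_boom : Prop := ∀ (n : Int), Dom_seven_boom n → Spec_seven_boom n (seven_boom n)

-- ===== LEMMAS AND PROOFS =====

-- A is the filter of 1..n by the combined predicate
theorem seven_boom_eq_filter (n : Int) :
    seven_boom n = (PySem.List.pyRange 1 (n + 1) 1).filter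
      (fun i => PySem.Int.mod i 7 == 0 || PySem.Str.isIn "7" (PySem.Int.toStr i)) := by
  unfold seven_boom
  rw [PySem.List.foldl_append_if_eq_filter]
  simp

-- the deduplicated union holds exactly the members of that filter
theorem mem_union_iff (n : Int) (x : Int) :
    (x ∈ PySem.Set.union (PySem.Set.ofList (PySem.List.pyRange 7 (n + 1) 7))
        (PySem.Set.ofList ((PySem.List.pyRange 1 (n + 1) 1).filter
          (fun i => PySem.Str.isIn "7" (PySem.Int.toStr i))))) ↔
      x ∈ (PySem.List.pyRange 1 (n + 1) 1).filter
        (fun i => PySem.Int.mod i 7 == 0 || PySem.Str.isIn "7" (PySem.Int.toStr i)) := by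
  rw [PySem.Set.mem_union, PySem.Set.mem_ofList, PySem.Set.mem_ofList,
    PySem.List.mem_pyRange_iff_of_pos (by norm_num)]
  simp only [List.mem_filter, PySem.List.mem_pyRange_one, Bool.or_eq_true, beq_iff_eq,
    PySem.Int.mod_eq_zero_iff_dvd]
  constructor
  · rintro (⟨h1, h2, h3⟩ | ⟨h1, hd⟩)
    · exact ⟨⟨by omega, h2⟩, Or.inl (by omega)⟩
    · exact ⟨h1, Or.inr hd⟩
  · rintro ⟨⟨h1, h2⟩, h3 | h3⟩
    · exact Or.inl ⟨Int.le_of_dvd (by omega) h3, h2, by omega⟩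
    · exact Or.inr ⟨⟨h1, h2⟩, h3⟩

theorem seven_boom_alt_eq_filter (n : Int) :
    seven_boom_alt n = (PySem.List.pyRange 1 (n + 1) 1).filter
      (fun i => PySem.Int.mod i 7 == 0 || PySem.Str.isIn "7" (PySem.Int.toStr i)) := by
  unfold seven_boom_alt
  apply PySem.List.sorted_eq_of_perm_of_pairwise_lt
  · rw [List.perm_ext_iff_of_nodup
      ((PySem.List.nodup_pyRange_one 1 (n + 1)).filter _)
      (PySem.Set.nodup_union _ _ (PySem.Set.nodup_ofList _))]
    intro x
    exact (mem_union_iff n x).symm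
  · exact (PySem.List.pairwise_lt_pyRange_one 1 (n + 1)).filter _

-- ===== VERDICT (by name: the statement is the Claim_ definition above) =====
theorem seven_boom_spec : Claim_equal_seven_boom := by
  intro n _
  unfold Spec_seven_boom
  rw [seven_boom_eq_filter, seven_boom_alt_eq_filter]
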